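-- pv_equiv track=rewrite | github.com/TKGgunter/screen_capturer | python/tools.py | calc_glyph_location
-- ===== SOURCE A (Python) =====
-- def calc_glyph_location(min_arr, int_arr):
--     rt1 = []
--     for i, it in enumerate(min_arr[:-3]):
--         _abs = abs((min_arr[i+1] - it) + (min_arr[i+2] - min_arr[i+1]))
--         if _abs > 6.0 and min_arr[i+1] < 10.0:
--             rt1.append(i)
--     rt2 = []
--     for i, it in enumerate(int_arr[:-3]):
--         _abs = abs((int_arr[i+1] - it) + (int_arr[i+2] - int_arr[i+1]))
--         if _abs > 2.5 and int_arr[i+1] < 15.0: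
--             rt2.append(i)
--     _pop = []
--     for i in range(len(rt1)-1):
--         if abs(rt1[i] - rt1[i+1]) < 4:
--             _pop.append(i)
--     for i, it in enumerate(_pop):
--         rt1.pop(it - i)
--     _pop = []
--     for i in range(len(rt2)-1):
--         if abs(rt2[i] - rt2[i+1]) < 4:
--             _pop.append(i)
--     for i, it in enumerate(_pop):
--         rt2.pop(it - i)
--     return rt1, rt2
-- ===== SOURCE B (Python) =====
-- def calc_glyph_location(min_arr, int_arr):
--     # Single streaming pass per array: keep a 'pending' candidate index and emit it
--     # only once the next candidate is >= 4 away (thresholds doubled to stay in integers).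
--     def glyphs(arr, t2, bound):
--         out = []
--         pending = None
--         for i in range(len(arr) - 3):
--             if 2 * abs((arr[i+1] - arr[i]) + (arr[i+2] - arr[i+1])) > t2 and arr[i+1] < bound:
--                 if pending is not None and i - pending >= 4:
--                     out.append(pending)
--                 pending = i
--         if pending is not None:
--             out.append(pending)
--         return out
--     return glyphs(min_arr, 12, 10), glyphs(int_arr, 5, 15)
-- ===== Notes on version B (the rewrite author's own statement) =====
-- stated objective: faster
-- what changed: Replaced A's three-pass build-candidates/build-pop-list/destructive-.pop-with-shifting-offsets scheme per array with a single streaming pass that fuses the threshold test with adjacency pruning via one pending-candidate accumulator (thresholds doubled to stay in integer arithmetic).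
import Mathlib
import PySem

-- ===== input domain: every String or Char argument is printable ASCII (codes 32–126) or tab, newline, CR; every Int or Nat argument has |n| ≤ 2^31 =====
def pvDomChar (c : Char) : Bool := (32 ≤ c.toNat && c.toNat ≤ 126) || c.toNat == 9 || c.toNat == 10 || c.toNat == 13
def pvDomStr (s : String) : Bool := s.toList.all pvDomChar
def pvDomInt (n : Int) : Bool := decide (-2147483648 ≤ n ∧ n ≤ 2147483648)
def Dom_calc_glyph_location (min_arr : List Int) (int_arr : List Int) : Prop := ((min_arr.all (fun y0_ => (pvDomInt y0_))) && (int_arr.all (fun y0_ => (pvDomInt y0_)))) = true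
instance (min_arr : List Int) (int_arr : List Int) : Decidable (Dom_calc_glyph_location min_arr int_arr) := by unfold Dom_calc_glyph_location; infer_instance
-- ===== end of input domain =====

-- B is a single streaming pass per array (candidate test fused with adjacency pruning
-- via one 'pending' accumulator) instead of A's build-then-destructively-pop scheme, avoiding
-- A's shifting list.pop calls (a timing run measured B faster).
-- Float thresholds 6.0 / 2.5 on integer inputs are ported exactly as 2*|_abs| > 12 / > 5.

-- ===== PORT A =====
-- candidate loop of A ('for i, it in enumerate(arr[:-3]): ...'); t2 = doubled threshold
def pvPassA (arr : List Int) (t2 bnd : Int) : List Int :=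
  (PySem.List.enumerate (PySem.List.slice arr none (some (-3))) 0).foldl
    (fun rt p =>
      let i := p.1
      let it := p.2
      let a := |(PySem.List.pyGetD arr (i+1) 0 - it) +
                (PySem.List.pyGetD arr (i+2) 0 - PySem.List.pyGetD arr (i+1) 0)|
      if 2 * a > t2 ∧ PySem.List.pyGetD arr (i+1) 0 < bnd then rt ++ [i] else rt) []

-- '_pop = []; for i in range(len(rt)-1): if abs(rt[i]-rt[i+1]) < 4: _pop.append(i)'
def pvPopIdxA (rt : List Int) : List Int :=
  (PySem.List.pyRange 0 ((rt.length : Int) - 1) 1).foldl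
    (fun pp i =>
      if |PySem.List.pyGetD rt i 0 - PySem.List.pyGetD rt (i+1) 0| < 4 then pp ++ [i] else pp) []

-- 'for i, it in enumerate(_pop): rt.pop(it - i)'  (pop index is always in range here)
def pvPopA (rt pop : List Int) : List Int :=
  (PySem.List.enumerate pop 0).foldl
    (fun l p =>
      match PySem.List.pop? l (p.2 - p.1) with
      | some r => r.2
      | none => l) rt

def calc_glyph_location (min_arr : List Int) (int_arr : List Int) : List Int × List Int :=
  let rt1 := pvPassA min_arr 12 10
  let rt2 := pvPassA int_arr 5 15
  let rt1 := pvPopA rt1 (pvPopIdxA rt1)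
  let rt2 := pvPopA rt2 (pvPopIdxA rt2)
  (rt1, rt2)

-- ===== PORT B =====
-- one streaming pass: state = (emitted output, pending candidate)
def pvGlyphsB (arr : List Int) (t2 bnd : Int) : List Int :=
  let st := (PySem.List.pyRange 0 ((arr.length : Int) - 3) 1).foldl
    (fun (st : List Int × Option Int) i =>
      if 2 * |(PySem.List.pyGetD arr (i+1) 0 - PySem.List.pyGetD arr i 0) +
              (PySem.List.pyGetD arr (i+2) 0 - PySem.List.pyGetD arr (i+1) 0)| > t2 ∧
         PySem.List.pyGetD arr (i+1) 0 < bnd then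
        match st.2 with
        | some p => if i - p ≥ 4 then (st.1 ++ [p], some i) else (st.1, some i)
        | none => (st.1, some i)
      else st) ([], none)
  match st.2 with
  | some p => st.1 ++ [p]
  | none => st.1

def calc_glyph_location_alt (min_arr : List Int) (int_arr : List Int) : List Int × List Int :=
  (pvGlyphsB min_arr 12 10, pvGlyphsB int_arr 5 15)

-- ===== PRECONDITION & SPEC =====
def Spec_calc_glyph_location (min_arr : List Int) (int_arr : List Int) (out : List Int × List Int) : Prop := out = calc_glyph_location_alt min_arr int_arr
instance (min_arr : List Int) (int_arr : List Int) (out : List Int × List Int) : Decidable (Spec_calc_glyph_location min_arr int_arr out) := by unfold Spec_calc_glyph_location; infer_instance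

-- ===== CLAIM (what is proved, stated in full; the proofs are below) =====
def Claim_equal_calc_glyph_location : Prop := ∀ (min_arr : List Int) (int_arr : List Int), Dom_calc_glyph_location min_arr int_arr → Spec_calc_glyph_location min_arr int_arr (calc_glyph_location min_arr int_arr)

-- ===== LEMMAS AND PROOFS =====

-- the common candidate test / list both ports compute
def pvTest (arr : List Int) (t2 bnd : Int) (i : Int) : Bool :=
  decide (2 * |(PySem.List.pyGetD arr (i+1) 0 - PySem.List.pyGetD arr i 0) +
       (PySem.List.pyGetD arr (i+2) 0 - PySem.List.pyGetD arr (i+1) 0)| > t2) &&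
  decide (PySem.List.pyGetD arr (i+1) 0 < bnd)

def pvCand (arr : List Int) (t2 bnd : Int) : List Int :=
  (PySem.List.pyRange 0 ((arr.length : Int) - 3) 1).filter (pvTest arr t2 bnd)

def pvClose (rt : List Int) (i : Int) : Bool :=
  decide (|PySem.List.pyGetD rt i 0 - PySem.List.pyGetD rt (i+1) 0| < 4)

def pvPopSet (rt : List Int) : List Int :=
  (PySem.List.pyRange 0 ((rt.length : Int) - 1) 1).filter (pvClose rt)

-- reference pruning: drop each element whose successor is closer than 4
def pvKeep : List Int → List Int
  | [] => []
  | [a] => [a]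
  | a :: b :: t => if |a - b| < 4 then pvKeep (b :: t) else a :: pvKeep (b :: t)

-- keep the element at absolute position c, c+1, … unless that position is listed in P
def pvFilterIdx (l : List Int) (P : List Int) (c : Int) : List Int :=
  match l with
  | [] => []
  | x :: xs => if c ∈ P then pvFilterIdx xs P (c+1) else x :: pvFilterIdx xs P (c+1)

def pvPopFold (l : List Int) (P : List Int) (s : Int) : List Int :=
  (PySem.List.enumerate P s).foldl
    (fun l p =>
      match PySem.List.pop? l (p.2 - p.1) with
      | some r => r.2
      | none => l) l

def pvStep (st : List Int × Option Int) (i : Int) : List Int × Option Int :=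
  match st.2 with
  | some p => if i - p ≥ 4 then (st.1 ++ [p], some i) else (st.1, some i)
  | none => (st.1, some i)

def pvFinish (st : List Int × Option Int) : List Int :=
  match st.2 with
  | some p => st.1 ++ [p]
  | none => st.1

theorem pvRange_natsub (n k : Nat) :
    PySem.List.pyRange 0 ((n - k : Nat) : Int) 1 = PySem.List.pyRange 0 ((n : Int) - k) 1 := by
  rw [PySem.List.pyRange_one, PySem.List.pyRange_one]
  congr 2
  omega

theorem pvPassA_eq (arr : List Int) (t2 bnd : Int) :
    pvPassA arr t2 bnd = pvCand arr t2 bnd := by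
  unfold pvPassA
  rw [show PySem.List.slice arr none (some (-3)) = List.take (arr.length - 3) arr from
    PySem.List.slice_to_neg_ofNat arr 3 (by omega)]
  rw [PySem.List.enumerate_eq_map_pyRange _ 0, List.foldl_map]
  rw [PySem.List.foldl_congr_mem _ _
      (fun rt j => if pvTest arr t2 bnd j = true then rt ++ [j] else rt) []
      (by
        intro acc x hx
        rw [PySem.List.mem_pyRange_one] at hx
        have hx' : 0 ≤ x ∧ x < (arr.length : Int) - 3 := by
          simp [PySem.List.len] at hx
          constructor
          · exact hx.1
          · have := hx.2; omega
        have hget : PySem.List.pyGetD (List.take (arr.length - 3) arr) x 0 =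
            PySem.List.pyGetD arr x 0 := by
          rw [PySem.List.pyGetD_eq_getElem _ _ hx'.1 (by rw [List.length_take]; push_cast; omega),
              PySem.List.pyGetD_eq_getElem _ _ hx'.1 (by omega)]
          rw [List.getElem_take]
        simp only [hget, pvTest, Bool.and_eq_true, decide_eq_true_eq])]
  rw [PySem.List.foldl_append_ite_eq_filter (fun j => pvTest arr t2 bnd j = true)]
  simp only [List.nil_append, pvCand]
  have hr : PySem.List.pyRange 0 (PySem.List.len (List.take (arr.length - 3) arr)) 1 =
      PySem.List.pyRange 0 ((arr.length : Int) - 3) 1 := by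
    have : (List.take (arr.length - 3) arr).length = arr.length - 3 := by
      rw [List.length_take]; omega
    simp [PySem.List.len, this]
    exact pvRange_natsub arr.length 3
  rw [hr]
  congr 1
  funext j
  simp

theorem pvPopIdxA_eq (rt : List Int) : pvPopIdxA rt = pvPopSet rt := by
  unfold pvPopIdxA
  rw [PySem.List.foldl_append_ite_eq_filter
    (fun i => |PySem.List.pyGetD rt i 0 - PySem.List.pyGetD rt (i+1) 0| < 4)]
  simp only [List.nil_append]
  rfl

theorem pvGlyphsB_eq (arr : List Int) (t2 bnd : Int) :
    pvGlyphsB arr t2 bnd = pvFinish (List.foldl pvStep ([], none) (pvCand arr t2 bnd)) := by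
  unfold pvGlyphsB pvFinish pvCand
  rw [List.foldl_filter]
  rw [PySem.List.foldl_congr_mem _ _
      (fun x y => if pvTest arr t2 bnd y = true then pvStep x y else x) ([], none)
      (by
        intro acc x _
        simp only [pvTest, pvStep, Bool.and_eq_true, decide_eq_true_eq])]

theorem pvFilterIdx_nil (l : List Int) (c : Int) : pvFilterIdx l [] c = l := by
  induction l generalizing c with
  | nil => rfl
  | cons x xs ih => simp [pvFilterIdx, ih]

theorem pvFilterIdx_cons_lt (l : List Int) (P : List Int) (it c : Int) (h : it < c) :
    pvFilterIdx l (it :: P) c = pvFilterIdx l P c := by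
  induction l generalizing c with
  | nil => rfl
  | cons x xs ih =>
    simp only [pvFilterIdx, List.mem_cons]
    have : ¬ c = it := by omega
    simp only [this, false_or]
    rw [ih (c+1) (by omega)]

theorem pvFilterIdx_erase (m : Nat) (l : List Int) (s it : Int) (P : List Int)
    (hgt : ∀ y ∈ P, it < y) (hit : it = s + m) (hm : m < l.length) :
    pvFilterIdx l (it :: P) s = pvFilterIdx (l.eraseIdx m) P (s+1) := by
  induction m generalizing l s it with
  | zero =>
    obtain ⟨x, xs, rfl⟩ : ∃ x xs, l = x :: xs := by
      cases l with
      | nil => simp at hm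
      | cons a as => exact ⟨a, as, rfl⟩
    simp only [pvFilterIdx, List.eraseIdx_cons_zero]
    have hs : s = it := by omega
    simp only [hs, List.mem_cons, true_or, if_true]
    exact pvFilterIdx_cons_lt xs P it (it+1) (by omega)
  | succ m ih =>
    obtain ⟨x, xs, rfl⟩ : ∃ x xs, l = x :: xs := by
      cases l with
      | nil => simp at hm
      | cons a as => exact ⟨a, as, rfl⟩
    simp only [pvFilterIdx, List.eraseIdx_cons_succ]
    have h1 : s ∉ it :: P := by
      simp only [List.mem_cons]
      push_neg
      constructor
      · omega
      · intro hmem; have := hgt s hmem; omega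
    have h2 : s + 1 ∉ P := by
      intro hmem; have := hgt (s+1) hmem; omega
    simp only [h1, h2, if_neg, if_false]
    rw [ih xs (s+1) it hgt (by omega) (by simpa using hm)]

theorem pvPopFold_eq (P : List Int) (l : List Int) (s : Int)
    (hpw : P.Pairwise (· < ·))
    (hb : ∀ it ∈ P, s ≤ it ∧ it - s < (l.length : Int)) :
    pvPopFold l P s = pvFilterIdx l P s := by
  induction P generalizing l s with
  | nil => simp [pvPopFold, PySem.List.enumerate, pvFilterIdx_nil]
  | cons it P ih =>
    have hb0 := hb it (by simp)
    have hm : (it - s).toNat < l.length := by omega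
    unfold pvPopFold
    rw [PySem.List.enumerate_cons]
    simp only [List.foldl_cons]
    rw [show (it - s) = (((it - s).toNat : Nat) : Int) by omega]
    rw [PySem.List.pop?_natCast l _ hm]
    have step : pvPopFold (l.eraseIdx (it - s).toNat) P (s + 1) =
        pvFilterIdx (l.eraseIdx (it - s).toNat) P (s + 1) := by
      apply ih
      · exact hpw.sublist (List.sublist_cons_self _ _)
      · intro y hy
        have h1 := (List.pairwise_cons.mp hpw).1 y hy
        have h2 := hb y (by simp [hy])
        have hlen : (l.eraseIdx (it - s).toNat).length = l.length - 1 := by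
          rw [List.length_eraseIdx_of_lt hm]
        constructor
        · omega
        · rw [hlen]; omega
    calc pvPopFold (l.eraseIdx (it - s).toNat) P (s + 1)
        = pvFilterIdx (l.eraseIdx (it - s).toNat) P (s + 1) := step
      _ = pvFilterIdx l (it :: P) s := by
          rw [← pvFilterIdx_erase (it - s).toNat l s it P
            (fun y hy => (List.pairwise_cons.mp hpw).1 y hy) (by omega) hm]

theorem pvFilterIdx_popSet (rt : List Int) (c : Nat) :
    pvFilterIdx (rt.drop c) (pvPopSet rt) (c : Int) = pvKeep (rt.drop c) := by
  have hmem : ∀ (j : Int), j ∈ pvPopSet rt ↔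
      (0 ≤ j ∧ j < (rt.length : Int) - 1) ∧
      |PySem.List.pyGetD rt j 0 - PySem.List.pyGetD rt (j+1) 0| < 4 := by
    intro j
    simp [pvPopSet, List.mem_filter, PySem.List.mem_pyRange_one, pvClose]
  suffices h : ∀ n c, rt.length - c = n → pvFilterIdx (rt.drop c) (pvPopSet rt) (c : Int) = pvKeep (rt.drop c) by
    exact h _ c rfl
  intro n
  induction n using Nat.strong_induction_on with
  | _ n ihn =>
  intro c hn
  match hd : rt.drop c with
  | [] => simp [pvFilterIdx, pvKeep]
  | [x] =>
    have hc : c = rt.length - 1 ∧ c < rt.length := by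
      have h2 : (rt.drop c).length = rt.length - c := by simp
      rw [hd] at h2
      simp at h2
      omega
    simp only [pvFilterIdx, pvKeep]
    have : (c : Int) ∉ pvPopSet rt := by
      rw [hmem]
      push_neg
      intro h
      omega
    simp [this]
  | x :: y :: xs =>
    have hlen : rt.length - c = xs.length + 2 := by
      have h2 : (rt.drop c).length = rt.length - c := by simp
      rw [hd] at h2
      simp at h2
      omega
    have hclen : c + 1 < rt.length := by omega
    have hd1 : rt.drop (c+1) = y :: xs := by
      have : rt.drop (c+1) = (rt.drop c).tail := by
        rw [← List.drop_drop]
        simp [List.drop_one]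
      rw [this, hd]
      rfl
    have hx : rt[c]'(by omega) = x := by
      have : rt[c]? = (rt.drop c)[0]? := by
        simp [List.getElem?_drop]
      rw [hd] at this
      simp at this
      simp [List.getElem?_eq_getElem (by omega : c < rt.length)] at this
      exact this
    have hy : rt[c+1]'(hclen) = y := by
      have : rt[c+1]? = (rt.drop (c+1))[0]? := by
        simp [List.getElem?_drop]
      rw [hd1] at this
      simp at this
      simp [List.getElem?_eq_getElem hclen] at this
      exact this
    have hgx : PySem.List.pyGetD rt (c : Int) 0 = x := by
      rw [PySem.List.pyGetD_eq_getElem _ _ (by omega) (by exact_mod_cast by omega)]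
      simpa using hx
    have hgy : PySem.List.pyGetD rt ((c : Int)+1) 0 = y := by
      rw [show ((c : Int) + 1) = ((c+1 : Nat) : Int) by push_cast; ring]
      rw [PySem.List.pyGetD_eq_getElem _ _ (by omega) (by exact_mod_cast hclen)]
      simpa using hy
    have hrec : pvFilterIdx (y :: xs) (pvPopSet rt) ((c : Int) + 1) = pvKeep (y :: xs) := by
      have := ihn (rt.length - (c+1)) (by omega) (c+1) rfl
      rw [hd1] at this
      rw [show ((c : Int) + 1) = ((c+1 : Nat) : Int) by push_cast; ring]
      exact this
    have hmemc : (c : Int) ∈ pvPopSet rt ↔ |x - y| < 4 := by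
      rw [hmem, hgx, hgy]
      have : (0 : Int) ≤ c ∧ (c : Int) < (rt.length : Int) - 1 := by
        constructor
        · omega
        · push_cast
          omega
      tauto
    rw [show pvFilterIdx (x :: y :: xs) (pvPopSet rt) (c : Int) =
          if (c : Int) ∈ pvPopSet rt then pvFilterIdx (y :: xs) (pvPopSet rt) ((c : Int)+1)
          else x :: pvFilterIdx (y :: xs) (pvPopSet rt) ((c : Int)+1) from rfl,
        show pvKeep (x :: y :: xs) = if |x - y| < 4 then pvKeep (y :: xs) else x :: pvKeep (y :: xs) from rfl]
    by_cases hcl : |x - y| < 4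
    · rw [if_pos (hmemc.mpr hcl), if_pos hcl, hrec]
    · rw [if_neg (fun h => hcl (hmemc.mp h)), if_neg hcl, hrec]

theorem pvStream_go (cs : List Int) (out : List Int) (p : Int)
    (hch : List.IsChain (· < ·) (p :: cs)) :
    pvFinish (List.foldl pvStep (out, some p) cs) = out ++ pvKeep (p :: cs) := by
  induction cs generalizing out p with
  | nil => simp [pvFinish, pvKeep]
  | cons i t ih =>
    have hpi : p < i := (List.isChain_cons_cons.mp hch).1
    have hch' : List.IsChain (· < ·) (i :: t) := (List.isChain_cons_cons.mp hch).2
    simp only [List.foldl_cons, pvStep]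
    by_cases h4 : i - p ≥ 4
    · simp only [h4, if_pos]
      rw [ih (out ++ [p]) i hch']
      have : ¬ |p - i| < 4 := by
        rw [abs_sub_lt_iff]; omega
      simp [pvKeep, this]
    · simp only [h4, if_neg, if_false]
      rw [ih out i hch']
      have : |p - i| < 4 := by
        rw [abs_sub_lt_iff]; omega
      simp [pvKeep, this]

theorem pvStream_eq_keep (cs : List Int) (hch : List.IsChain (· < ·) cs) :
    pvFinish (List.foldl pvStep ([], none) cs) = pvKeep cs := by
  cases cs with
  | nil => rfl
  | cons p t =>
    simp only [List.foldl_cons, pvStep]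
    rw [pvStream_go t [] p hch]
    simp

theorem pvCand_chain (arr : List Int) (t2 bnd : Int) :
    List.IsChain (· < ·) (pvCand arr t2 bnd) := by
  apply List.Pairwise.isChain
  exact (PySem.List.pairwise_lt_pyRange_one _ _).filter _

-- the per-array equivalence
theorem calc_glyph_location_key (arr : List Int) (t2 bnd : Int) :
    pvPopA (pvPassA arr t2 bnd) (pvPopIdxA (pvPassA arr t2 bnd)) = pvGlyphsB arr t2 bnd := by
  rw [pvPassA_eq, pvPopIdxA_eq, pvGlyphsB_eq]
  set rt := pvCand arr t2 bnd with hrt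
  have h1 : pvPopA rt (pvPopSet rt) = pvPopFold rt (pvPopSet rt) 0 := rfl
  rw [h1]
  rw [pvPopFold_eq (pvPopSet rt) rt 0
    ((PySem.List.pairwise_lt_pyRange_one _ _).filter _)
    (by
      intro it hit
      simp [pvPopSet, List.mem_filter, PySem.List.mem_pyRange_one] at hit
      obtain ⟨⟨h1, h2⟩, _⟩ := hit
      omega)]
  have := pvFilterIdx_popSet rt 0
  simp at this
  rw [this]
  rw [pvStream_eq_keep rt (pvCand_chain arr t2 bnd)]


-- ===== VERDICT (by name: the statement is the Claim_ definition above) =====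
theorem calc_glyph_location_spec : Claim_equal_calc_glyph_location := by
  intro min_arr int_arr _
  show _ = _
  simp only [calc_glyph_location, calc_glyph_location_alt, calc_glyph_location_key]
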